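-- pv_equiv track=rewrite | github.com/DimonBor/Study | АЗИ/Lab_6-7/lab_6-7.py | generate
-- ===== SOURCE A (Python) =====
-- def generate(A, C, b, T_0, i):                # Generating pseudo random numbers
--     output = []
--     output.append(T_0)
--
--     for i in range(i):
--         generated = (A * output[-1] + C) % pow(2, b)
--         while generated > 33: generated -= 33
--         output.append(generated)
--
--     return output[1:]
-- ===== SOURCE B (Python) =====
-- def generate(A, C, b, T_0, i):
--     # Closed-form range reduction instead of A's repeated-subtraction while loop;
--     # single running value instead of a list indexed with [-1] and sliced at the end.
--     m = 1 << b
--     res = []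
--     prev = T_0
--     for _ in range(i):
--         g = (A * prev + C) % m
--         prev = 0 if g == 0 else (g - 1) % 33 + 1
--         res.append(prev)
--     return res
-- ===== Notes on version B (the rewrite author's own statement) =====
-- stated objective: faster
-- what changed: The repeated 'generated -= 33' while loop is replaced by the closed form ((g-1)%33)+1 (0 for g=0), and the growing list with output[-1] indexing and a final [1:] slice is replaced by a single running value.
-- outside the precondition, e.g. on generate(1, 0, -1, 5, 2): A returns [0.0, 0.0], B raises ValueError
import Mathlib
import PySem

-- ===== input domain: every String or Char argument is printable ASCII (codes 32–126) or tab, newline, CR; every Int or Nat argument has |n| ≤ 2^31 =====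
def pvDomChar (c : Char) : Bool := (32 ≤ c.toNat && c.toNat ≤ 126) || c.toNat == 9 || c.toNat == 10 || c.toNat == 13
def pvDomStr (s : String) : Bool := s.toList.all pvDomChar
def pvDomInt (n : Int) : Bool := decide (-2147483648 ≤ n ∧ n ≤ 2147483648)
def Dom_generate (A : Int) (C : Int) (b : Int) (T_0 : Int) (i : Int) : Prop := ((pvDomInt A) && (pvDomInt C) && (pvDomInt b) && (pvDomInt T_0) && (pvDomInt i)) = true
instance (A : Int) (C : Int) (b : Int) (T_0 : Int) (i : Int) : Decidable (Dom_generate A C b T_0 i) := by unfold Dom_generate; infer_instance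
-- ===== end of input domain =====

-- B replaces A's repeated-subtraction while loop by a closed-form mod and the
-- list-with-[-1]-indexing by a running value: asymptotically faster, equal on Pre_.

-- ===== PORT A =====
-- 'while generated > 33: generated -= 33'
def pvWhile33 (g : Int) : Int :=
  if g > 33 then pvWhile33 (g - 33) else g
termination_by g.toNat
decreasing_by omega

-- 'for i in range(i): …' appending to output (loop variable is unused by the body)
def pvLoopA (A C b : Int) : List Int → Nat → List Int
  | out, 0 => out
  | out, n + 1 =>
    let generated := PySem.Int.mod (A * PySem.List.pyGetD out (-1) 0 + C) (2 ^ b.toNat)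
    pvLoopA A C b (out ++ [pvWhile33 generated]) n

-- pow(2, b): exact for b ≥ 0 (Pre_); for b < 0 Python returns a float, excluded by Pre_.
def generate (A : Int) (C : Int) (b : Int) (T_0 : Int) (i : Int) : List Int :=
  PySem.List.slice (pvLoopA A C b [T_0] i.toNat) (some 1) none

-- ===== PORT B =====
def pvLoopB (A C m : Int) : Int → Nat → List Int
  | _, 0 => []
  | prev, n + 1 =>
    let g := PySem.Int.mod (A * prev + C) m
    let p := if g = 0 then 0 else PySem.Int.mod (g - 1) 33 + 1
    p :: pvLoopB A C m p n

-- '1 << b': exact for b ≥ 0 (Pre_); for b < 0 Python raises ValueError.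
def generate_alt (A : Int) (C : Int) (b : Int) (T_0 : Int) (i : Int) : List Int :=
  pvLoopB A C (2 ^ b.toNat) T_0 i.toNat

-- ===== PRECONDITION & SPEC =====
-- Pre_ excludes b < 0: there pow(2, b) is a Python float, so A returns a list of
-- floats (not ints) and B's '1 << b' raises ValueError.
def Pre_generate (A : Int) (C : Int) (b : Int) (T_0 : Int) (i : Int) : Prop := 0 ≤ b
instance (A : Int) (C : Int) (b : Int) (T_0 : Int) (i : Int) : Decidable (Pre_generate A C b T_0 i) := by unfold Pre_generate; infer_instance
def pvWitness_generate : Int × Int × Int × Int × Int := (5, 3, 8, 7, 10)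

def Spec_generate (A : Int) (C : Int) (b : Int) (T_0 : Int) (i : Int) (out : List Int) : Prop := out = generate_alt A C b T_0 i
instance (A : Int) (C : Int) (b : Int) (T_0 : Int) (i : Int) (out : List Int) : Decidable (Spec_generate A C b T_0 i out) := by unfold Spec_generate; infer_instance

-- ===== CLAIM (what is proved, stated in full; the proofs are below) =====
def Claim_equal_generate : Prop := ∀ (A : Int) (C : Int) (b : Int) (T_0 : Int) (i : Int), Dom_generate A C b T_0 i → Pre_generate A C b T_0 i → Spec_generate A C b T_0 i (generate A C b T_0 i)

-- ===== LEMMAS AND PROOFS =====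

-- The while loop computes the closed form, for any nonnegative start.
theorem pvWhile33_closed (g : Int) (hg : 0 ≤ g) :
    pvWhile33 g = if g = 0 then 0 else PySem.Int.mod (g - 1) 33 + 1 := by
  induction g using pvWhile33.induct with
  | case1 g h ih =>
    rw [pvWhile33, if_pos h, ih (by omega)]
    rw [if_neg (by omega), if_neg (by omega)]
    have : PySem.Int.mod (g - 33 - 1) 33 = PySem.Int.mod (g - 1) 33 := by
      simp only [PySem.Int.mod_eq_emod_of_pos (show (0:Int) < 33 by norm_num)]
      omega
    rw [this]
  | case2 g h =>
    rw [pvWhile33, if_neg h]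
    by_cases h0 : g = 0
    · simp [h0]
    · rw [if_neg h0,
        PySem.Int.mod_eq_emod_of_pos (show (0:Int) < 33 by norm_num)]
      omega

theorem pvLoopA_eq (A C b : Int) (n : Nat) :
    ∀ (pre : List Int) (prev : Int),
      pvLoopA A C b (pre ++ [prev]) n
        = (pre ++ [prev]) ++ pvLoopB A C (2 ^ b.toNat) prev n := by
  induction n with
  | zero => intro pre prev; simp [pvLoopA, pvLoopB]
  | succ n ih =>
    intro pre prev
    rw [pvLoopA, pvLoopB]
    have hlast : PySem.List.pyGetD (pre ++ [prev]) (-1) 0 = prev :=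
      PySem.List.pyGetD_neg_one_append_singleton pre prev 0
    have hm : (0 : Int) < 2 ^ b.toNat := by positivity
    have hg : 0 ≤ PySem.Int.mod (A * prev + C) (2 ^ b.toNat) := by
      rw [PySem.Int.mod_eq_emod_of_pos hm]
      exact Int.emod_nonneg _ (by omega)
    rw [hlast, pvWhile33_closed _ hg]
    have := ih (pre ++ [prev])
      (if PySem.Int.mod (A * prev + C) (2 ^ b.toNat) = 0 then 0
       else PySem.Int.mod (PySem.Int.mod (A * prev + C) (2 ^ b.toNat) - 1) 33 + 1)
    simpa using this

-- ===== VERDICT (by name: the statement is the Claim_ definition above) =====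
theorem generate_spec : Claim_equal_generate := by
  intro A C b T_0 i _ _
  unfold Spec_generate generate generate_alt
  have := pvLoopA_eq A C b i.toNat [] T_0
  simp only [List.nil_append] at this
  rw [this]
  have h1 : PySem.List.slice ([T_0] ++ pvLoopB A C (2 ^ b.toNat) T_0 i.toNat) (some ((1 : Nat) : Int)) none
      = (([T_0] ++ pvLoopB A C (2 ^ b.toNat) T_0 i.toNat).drop 1) :=
    PySem.List.slice_from_natCast _ 1
  simpa using h1
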